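-- pv_equiv track=rewrite | github.com/Kaiolohia/Encryption | EncryptDecryptV4_C.py | numbers_encrypt
-- ===== SOURCE A (Python) =====
-- def numbers_encrypt(msg):
--   """
--   Encrypts numbers by pulling their index from scramble array
--   then replacing them in the message.
--   the scramble array for encryption gets shifted from right to left every iteration/check
--   IE iteration 0 // 0,1,2,3,4,5,6,7,8,9
--     iteration 1 // 1,2,3,4,5,6,7,8,9,0
--   """
--
--   msg = list(msg)
--   scramble_array = [0,1,2,3,4,5,6,7,8,9]
--   new_msg = []
--   for char in list("".join(msg)):
--     scramble_array.append(scramble_array.pop(0))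
--     if str(char).isdigit():
--       new_msg.append(str(scramble_array.index(int(char))))
--     else:
--       new_msg.append(str(char))
--   return new_msg
-- ===== SOURCE B (Python) =====
-- def numbers_encrypt(msg):
--   """Closed-form rewrite: after i+1 left rotations the scramble array holds value v
--   at position (v - i - 1) % 10, so the index lookup is direct modular arithmetic."""
--   return [str((int(char) - i - 1) % 10) if char.isdigit() else str(char)
--           for i, char in enumerate(msg)]
-- ===== Notes on version B (the rewrite author's own statement) =====
-- stated objective: simpler
-- what changed: Replaced the mutable rotating scramble array and its linear .index scan with a single comprehension computing each digit's position by the closed form (int(char) - i - 1) % 10.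
import Mathlib
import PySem

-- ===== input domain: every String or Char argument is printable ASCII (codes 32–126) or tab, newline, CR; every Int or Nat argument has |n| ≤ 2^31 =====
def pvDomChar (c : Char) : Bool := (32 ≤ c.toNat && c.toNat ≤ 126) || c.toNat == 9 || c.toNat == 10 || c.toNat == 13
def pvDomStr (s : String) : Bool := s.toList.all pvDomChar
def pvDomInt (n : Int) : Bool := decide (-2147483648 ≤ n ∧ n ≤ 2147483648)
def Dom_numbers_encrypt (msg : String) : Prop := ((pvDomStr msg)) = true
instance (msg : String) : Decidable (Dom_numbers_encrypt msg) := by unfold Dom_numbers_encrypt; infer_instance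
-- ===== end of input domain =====

-- B replaces A's mutable rotating scramble array and its .index scan with a single
-- map computing each encrypted digit by the closed form (int(char) - i - 1) % 10 (objective: simpler).

-- ===== PORT A =====
-- scramble_array.append(scramble_array.pop(0)): left rotation by one
def pvRotate (s : List Int) : List Int := s.drop 1 ++ s.take 1

def pvLoopA : List Char → List Int → List String → List String
  | [], _, acc => acc
  | c :: cs, s, acc =>
    if PySem.Chars.isdigit c then
      pvLoopA cs (pvRotate s)
        (acc ++ [PySem.Int.toStr (((PySem.List.index? (pvRotate s) ((PySem.Int.ofChars? [c]).getD 0)).getD 0 : Nat) : Int)])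
    else
      pvLoopA cs (pvRotate s) (acc ++ [String.ofList [c]])

def numbers_encrypt (msg : String) : List String :=
  pvLoopA msg.toList [0,1,2,3,4,5,6,7,8,9] []

-- ===== PORT B =====
-- the comprehension body of Source B
def pvEncChar (p : Int × Char) : String :=
  if PySem.Chars.isdigit p.2 then
    PySem.Int.toStr (PySem.Int.mod ((PySem.Int.ofChars? [p.2]).getD 0 - p.1 - 1) 10)
  else String.ofList [p.2]

def numbers_encrypt_alt (msg : String) : List String :=
  (PySem.List.enumerate msg.toList 0).map pvEncChar

-- ===== PRECONDITION & SPEC =====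
def Spec_numbers_encrypt (msg : String) (out : List String) : Prop := out = numbers_encrypt_alt msg
instance (msg : String) (out : List String) : Decidable (Spec_numbers_encrypt msg out) := by unfold Spec_numbers_encrypt; infer_instance

-- ===== CLAIM (what is proved, stated in full; the proofs are below) =====
def Claim_equal_numbers_encrypt : Prop := ∀ (msg : String), Dom_numbers_encrypt msg → Spec_numbers_encrypt msg (numbers_encrypt msg)

-- ===== LEMMAS AND PROOFS =====

-- the scramble array after i left rotations
def rotN (i : Nat) : List Int :=
  [((i % 10 : Nat) : Int), (((i+1) % 10 : Nat) : Int), (((i+2) % 10 : Nat) : Int),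
   (((i+3) % 10 : Nat) : Int), (((i+4) % 10 : Nat) : Int), (((i+5) % 10 : Nat) : Int),
   (((i+6) % 10 : Nat) : Int), (((i+7) % 10 : Nat) : Int), (((i+8) % 10 : Nat) : Int),
   (((i+9) % 10 : Nat) : Int)]

theorem rot_step (i : Nat) : pvRotate (rotN i) = rotN (i+1) := by
  simp [pvRotate, rotN]
  omega

theorem mem10 (c : Char) (h : PySem.Chars.isdigit c = true) :
    c ∈ ['0','1','2','3','4','5','6','7','8','9'] := by
  simp only [PySem.Chars.isdigit, Bool.and_eq_true, decide_eq_true_eq] at h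
  obtain ⟨h1, h2⟩ := h
  have hl : 48 ≤ c.toNat := Nat.succ_le_of_lt h1
  have hu : c.toNat ≤ 57 := Nat.lt_succ_iff.mp (Nat.lt_succ_of_le h2)
  have hofn := Char.ofNat_toNat c
  interval_cases h3 : c.toNat <;> (rw [← hofn]; decide)

theorem digit_spec (c : Char) (h : PySem.Chars.isdigit c = true) :
    ∃ d : Nat, d < 10 ∧ PySem.Int.ofChars? [c] = some (d : Int) := by
  have hm := mem10 c h
  fin_cases hm
  · exact ⟨0, by norm_num, by decide⟩
  · exact ⟨1, by norm_num, by decide⟩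
  · exact ⟨2, by norm_num, by decide⟩
  · exact ⟨3, by norm_num, by decide⟩
  · exact ⟨4, by norm_num, by decide⟩
  · exact ⟨5, by norm_num, by decide⟩
  · exact ⟨6, by norm_num, by decide⟩
  · exact ⟨7, by norm_num, by decide⟩
  · exact ⟨8, by norm_num, by decide⟩
  · exact ⟨9, by norm_num, by decide⟩

theorem idx (k d : Nat) (hd : d < 10) :
    (((PySem.List.index? (rotN k) ((d : Nat) : Int)).getD 0 : Nat) : Int)
      = ((d : Int) - (k : Int)) % 10 := by
  have h1 : rotN k = rotN (k % 10) := by simp [rotN]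
  have h2 : ((d : Int) - (k : Int)) % 10 = ((d : Int) - ((k % 10 : Nat) : Int)) % 10 := by omega
  rw [h1, h2]
  have hr : k % 10 < 10 := Nat.mod_lt _ (by norm_num)
  generalize k % 10 = r at hr ⊢
  interval_cases r <;> interval_cases d <;> decide

theorem loopA_eq (cs : List Char) : ∀ (i : Nat) (acc : List String),
    pvLoopA cs (rotN i) acc = acc ++ (PySem.List.enumerate cs (i : Int)).map pvEncChar := by
  induction cs with
  | nil => intro i acc; simp [pvLoopA, PySem.List.enumerate]
  | cons c cs ih =>
    intro i acc
    rw [PySem.List.enumerate_cons]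
    by_cases h : PySem.Chars.isdigit c = true
    · obtain ⟨d, hd, hof⟩ := digit_spec c h
      have hidx := idx (i+1) d hd
      simp only [pvLoopA, h, if_true, rot_step, hof, Option.getD_some, List.map_cons]
      rw [hidx, ih (i+1)]
      have hchar : pvEncChar ((i : Int), c) = PySem.Int.toStr (((d : Int) - (i : Int)) % 10 - 1 + 10 * (if ((d : Int) - (i : Int)) % 10 = 0 then 1 else 0)) := by
        simp only [pvEncChar, h, if_true, hof, Option.getD_some,
          PySem.Int.mod_eq_emod_of_pos (by norm_num : (0:Int) < 10)]
        congr 1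
        omega
      rw [hchar]
      have hcast : ((i : Int) + 1) = (((i+1 : Nat) : Nat) : Int) := by omega
      rw [hcast]
      have hval : ((d : Int) - ((i+1 : Nat) : Int)) % 10
          = ((d : Int) - (i : Int)) % 10 - 1 + 10 * (if ((d : Int) - (i : Int)) % 10 = 0 then 1 else 0) := by
        split_ifs with h0 <;> omega
      rw [hval]
      simp
    · simp only [pvLoopA, h, Bool.false_eq_true, if_false, rot_step, List.map_cons]
      have hcast : ((i : Int) + 1) = (((i+1 : Nat)) : Int) := by omega
      rw [hcast, ih (i+1)]
      simp [pvEncChar, h]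

-- ===== VERDICT (by name: the statement is the Claim_ definition above) =====
theorem numbers_encrypt_spec : Claim_equal_numbers_encrypt := by
  intro msg _
  show numbers_encrypt msg = numbers_encrypt_alt msg
  unfold numbers_encrypt numbers_encrypt_alt
  have h0 : ([0,1,2,3,4,5,6,7,8,9] : List Int) = rotN 0 := by decide
  rw [h0, loopA_eq msg.toList 0 []]
  simp
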